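-- pv_equiv track=rewrite | github.com/amacerdem/SRC-Musical-Intelligence | mi_beta/core/demand_aggregator.py | demand_by_horizon
-- ===== SOURCE A (Python) =====
-- from typing import Dict, List, Set, Tuple
--
-- def demand_by_horizon(
--     demand: Set[Tuple[int, int, int, int]],
-- ) -> Dict[int, List[Tuple[int, int, int, int]]]:
--     """Group demand tuples by horizon index.
--
--     Useful for the H3 engine to process demands in horizon order.
--
--     Args:
--         demand: Set of 4-tuples.
--
--     Returns:
--         Dict mapping horizon index to sorted list of tuples at that horizon.
--     """
--     by_h: Dict[int, List[Tuple[int, int, int, int]]] = {}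
--     for tup in demand:
--         by_h.setdefault(tup[1], []).append(tup)
--     for lst in by_h.values():
--         lst.sort()
--     return dict(sorted(by_h.items()))
-- ===== SOURCE B (Python) =====
-- from itertools import groupby
-- from typing import Dict, List, Set, Tuple
--
--
-- def demand_by_horizon(
--     demand: Set[Tuple[int, int, int, int]],
-- ) -> Dict[int, List[Tuple[int, int, int, int]]]:
--     """Group demand tuples by horizon index: sort once by (horizon, tuple),
--     then cut the sorted sequence into runs of equal horizon with groupby."""
--     ordered = sorted(demand, key=lambda t: (t[1], t))
--     return {h: list(grp) for h, grp in groupby(ordered, key=lambda t: t[1])}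
-- ===== Notes on version B (the rewrite author's own statement) =====
-- stated objective: alternative
-- what changed: Instead of bucketing tuples into a dict keyed by horizon, sorting each bucket and then sorting the dict items, B sorts the whole collection once by (horizon, tuple) and cuts the sorted sequence into consecutive runs of equal horizon with itertools.groupby.
import Mathlib
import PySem

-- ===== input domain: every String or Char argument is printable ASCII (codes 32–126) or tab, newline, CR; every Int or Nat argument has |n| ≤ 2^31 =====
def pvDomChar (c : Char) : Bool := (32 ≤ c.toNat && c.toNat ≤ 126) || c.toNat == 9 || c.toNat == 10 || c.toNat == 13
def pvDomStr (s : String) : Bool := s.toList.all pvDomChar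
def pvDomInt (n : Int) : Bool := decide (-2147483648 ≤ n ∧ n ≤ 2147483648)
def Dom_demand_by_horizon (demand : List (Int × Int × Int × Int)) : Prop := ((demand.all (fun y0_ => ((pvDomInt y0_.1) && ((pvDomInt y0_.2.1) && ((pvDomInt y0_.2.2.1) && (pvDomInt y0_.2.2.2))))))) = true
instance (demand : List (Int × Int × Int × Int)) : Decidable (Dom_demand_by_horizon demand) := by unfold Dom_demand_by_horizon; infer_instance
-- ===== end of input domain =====

-- B replaces A's bucket-per-horizon dict (sort each bucket, then sort the items) by one sort of the
-- whole list by (horizon, tuple) followed by a single groupby pass over the sorted sequence ("alternative").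
-- A iterates a Python set; its result does not depend on that iteration order, so the list ports are faithful.

-- Python's '<' on 4-tuples of ints is lexicographic: expressed as an order-embedding into the lexicographic product
def pvKey4 (t : Int × Int × Int × Int) : Lex (Int × Lex (Int × Lex (Int × Int))) :=
  toLex (t.1, toLex (t.2.1, toLex (t.2.2.1, t.2.2.2)))

-- ===== PORT A =====
def demand_by_horizon (demand : List (Int × Int × Int × Int)) : List (Int × List (Int × Int × Int × Int)) :=
  -- by_h.setdefault(tup[1], []).append(tup)  ==  by_h[tup[1]] = by_h.get(tup[1], []) + [tup]
  let by_h : PySem.Dict Int (List (Int × Int × Int × Int)) :=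
    demand.foldl (fun d tup => d.modify tup.2.1 [] (fun lst => lst ++ [tup])) PySem.Dict.empty
  -- 'for lst in by_h.values(): lst.sort()' — in-place sort of every value, tuple comparison via pvKey4
  let by_h : PySem.Dict Int (List (Int × Int × Int × Int)) :=
    PySem.Dict.mk (by_h.items.map (fun p => (p.1, PySem.List.sorted p.2 pvKey4)))
  -- dict(sorted(by_h.items())): the keys are distinct, so Python's pair comparison only ever reads the key
  PySem.List.sorted by_h.items (fun p => p.1)

-- ===== PORT B =====
-- sorted(demand, key=lambda t: (t[1], t))
def pvKeyB (t : Int × Int × Int × Int) : Lex (Int × Lex (Int × Lex (Int × Lex (Int × Int)))) :=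
  toLex (t.2.1, pvKey4 t)

-- itertools.groupby(ordered, key=lambda t: t[1]) consumed into {h: list(grp)}: one pass over runs
def pvGroupby : List (Int × Int × Int × Int) → List (Int × List (Int × Int × Int × Int))
  | [] => []
  | t :: rest =>
    (t.2.1, t :: rest.takeWhile (fun u => u.2.1 == t.2.1)) ::
      pvGroupby (rest.dropWhile (fun u => u.2.1 == t.2.1))
termination_by l => l.length
decreasing_by
  simpa [Nat.lt_succ_iff] using List.length_dropWhile_le (fun u => u.2.1 == t.2.1) rest

def demand_by_horizon_alt (demand : List (Int × Int × Int × Int)) : List (Int × List (Int × Int × Int × Int)) :=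
  pvGroupby (PySem.List.sorted demand pvKeyB)

-- ===== PRECONDITION & SPEC =====
def Spec_demand_by_horizon (demand : List (Int × Int × Int × Int)) (out : List (Int × List (Int × Int × Int × Int))) : Prop := out = demand_by_horizon_alt demand
instance (demand : List (Int × Int × Int × Int)) (out : List (Int × List (Int × Int × Int × Int))) : Decidable (Spec_demand_by_horizon demand out) := by unfold Spec_demand_by_horizon; infer_instance

-- ===== CLAIM (what is proved, stated in full; the proofs are below) =====
def Claim_equal_demand_by_horizon : Prop := ∀ (demand : List (Int × Int × Int × Int)), Dom_demand_by_horizon demand → Spec_demand_by_horizon demand (demand_by_horizon demand)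

-- ===== LEMMAS AND PROOFS =====

-- the common canonical value both ports compute
def pvCanon (demand : List (Int × Int × Int × Int)) : List (Int × List (Int × Int × Int × Int)) :=
  (PySem.List.sorted (PySem.Set.ofList (demand.map (fun t => t.2.1))) (fun h => h)).map
    (fun h => (h, PySem.List.sorted (demand.filter (fun t => t.2.1 == h)) pvKey4))

lemma pvKey4_injective : Function.Injective pvKey4 := by
  rintro ⟨a1, a2, a3, a4⟩ ⟨b1, b2, b3, b4⟩ h
  simp only [pvKey4, toLex_inj, Prod.mk.injEq] at h
  simp [h.1, h.2.1, h.2.2.1, h.2.2.2]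

lemma pvKeyB_le_iff (a b : Int × Int × Int × Int) :
    pvKeyB a ≤ pvKeyB b ↔ a.2.1 < b.2.1 ∨ (a.2.1 = b.2.1 ∧ pvKey4 a ≤ pvKey4 b) := by
  simp [pvKeyB, Prod.Lex.toLex_le_toLex]

lemma pvKeyB_le_ids {a b : Int × Int × Int × Int} (h : pvKeyB a ≤ pvKeyB b) : a.2.1 ≤ b.2.1 := by
  rcases (pvKeyB_le_iff a b).1 h with h' | h' <;> omega

lemma pv_dropWhile_head_false {α : Type} (p : α → Bool) :
    ∀ (l : List α) (x : α) (xs : List α), l.dropWhile p = x :: xs → p x = false := by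
  intro l
  induction l with
  | nil => intro x xs h; simp at h
  | cons a t ih =>
    intro x xs h
    by_cases hp : p a = true
    · exact ih x xs (by simpa [List.dropWhile_cons, hp] using h)
    · simp only [List.dropWhile_cons, hp] at h
      injection h with h1 _
      subst h1
      simpa using hp

-- foldl Set.add over elements already present is a no-op
lemma pv_foldl_add_noop {α : Type} [BEq α] [LawfulBEq α] (h : α) :
    ∀ (l : List α) (s : PySem.Set α), (∀ x ∈ l, x = h) → h ∈ s →
      l.foldl PySem.Set.add s = s := by
  intro l
  induction l with
  | nil => intro s _ _; rfl
  | cons a t ih =>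
    intro s hall hs
    have ha : a = h := hall a (by simp)
    have : PySem.Set.add s a = s := PySem.Set.add_of_mem (by simpa [ha] using hs)
    simp only [List.foldl_cons, this]
    exact ih s (fun x hx => hall x (by simp [hx])) hs

-- foldl Set.add commutes with a head element not occurring in the list
lemma pv_foldl_add_cons {α : Type} [BEq α] [LawfulBEq α] (h : α) :
    ∀ (l : List α) (s : PySem.Set α), h ∉ l →
      l.foldl PySem.Set.add (h :: s) = h :: l.foldl PySem.Set.add s := by
  intro l
  induction l with
  | nil => intro s _; rfl
  | cons a t ih =>
    intro s hnl
    have hah : a ≠ h := fun e => hnl (by simp [e])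
    have hstep : PySem.Set.add (h :: s) a = h :: PySem.Set.add s a := by
      rw [PySem.Set.add_eq_ite, PySem.Set.add_eq_ite]
      by_cases hm : a ∈ s
      · simp [hm, hah]
      · simp [hm, hah]
    simp only [List.foldl_cons, hstep]
    exact ih (PySem.Set.add s a) (fun hx => hnl (by simp [hx]))

-- foldl Set.add only ever appends elements of the traversed list
lemma pv_foldl_add_sublist {α : Type} [BEq α] :
    ∀ (l : List α) (s : PySem.Set α), (l.foldl PySem.Set.add s).Sublist (s ++ l) := by
  intro l
  induction l with
  | nil => intro s; simp
  | cons a t ih =>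
    intro s
    have h1 := ih (PySem.Set.add s a)
    have h2 : (PySem.Set.add s a ++ t).Sublist (s ++ a :: t) := by
      rw [PySem.Set.add]
      by_cases hm : PySem.Set.contains s a
      · simp only [hm, if_pos]
        exact List.Sublist.append_left (List.sublist_cons_self a t) s
      · simp only [hm, if_neg, Bool.false_eq_true, not_false_eq_true, List.append_assoc,
          List.singleton_append]
        exact List.Sublist.refl _
    exact (List.foldl_cons .. ▸ h1).trans h2

lemma pv_dedup_block (h : Int) (l1 l2 : List Int) (h1 : ∀ x ∈ l1, x = h) (h2 : h ∉ l2) :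
    PySem.List.dedup (h :: (l1 ++ l2)) = h :: PySem.List.dedup l2 := by
  rw [PySem.List.dedup_eq_ofList, PySem.List.dedup_eq_ofList]
  show (h :: (l1 ++ l2)).foldl PySem.Set.add [] = h :: l2.foldl PySem.Set.add []
  have hadd : PySem.Set.add ([] : PySem.Set Int) h = [h] := PySem.Set.add_of_not_mem (by simp)
  rw [List.foldl_cons, hadd, List.foldl_append,
    pv_foldl_add_noop h l1 [h] h1 (by simp)]
  exact pv_foldl_add_cons h l2 [] h2

-- every tuple surviving the dropWhile has a strictly larger horizon than the run head
lemma pv_dropWhile_gt (t : Int × Int × Int × Int) (rest : List (Int × Int × Int × Int))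
    (hmono : ∀ u ∈ rest, pvKeyB t ≤ pvKeyB u)
    (hrest : rest.Pairwise (fun a b => pvKeyB a ≤ pvKeyB b)) :
    ∀ u ∈ rest.dropWhile (fun u => u.2.1 == t.2.1), t.2.1 < u.2.1 := by
  intro u hu
  cases hdw : rest.dropWhile (fun u => u.2.1 == t.2.1) with
  | nil => rw [hdw] at hu; simp at hu
  | cons v w =>
    have hv : (fun u => u.2.1 == t.2.1) v = false := pv_dropWhile_head_false _ rest v w hdw
    have hvne : v.2.1 ≠ t.2.1 := by simpa using hv
    have hvmem : v ∈ rest := List.Sublist.mem (by rw [hdw]; simp) (List.dropWhile_sublist _)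
    have hvle : t.2.1 ≤ v.2.1 := pvKeyB_le_ids (hmono v hvmem)
    have hvlt : t.2.1 < v.2.1 := lt_of_le_of_ne hvle (Ne.symm hvne)
    rw [hdw] at hu
    rcases List.mem_cons.mp hu with hu' | hu'
    · subst hu'; exact hvlt
    · have hpw'' := List.Pairwise.sublist (List.dropWhile_sublist (fun u : Int × Int × Int × Int => u.2.1 == t.2.1)) hrest
      rw [hdw, List.pairwise_cons] at hpw''
      have := pvKeyB_le_ids (hpw''.1 u hu')
      omega

-- the groupby pass over a (horizon, tuple)-sorted list, characterised
lemma pvGroupby_spec : ∀ (n : Nat) (s : List (Int × Int × Int × Int)), s.length ≤ n →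
    s.Pairwise (fun a b => pvKeyB a ≤ pvKeyB b) →
    pvGroupby s = (PySem.List.dedup (s.map (fun t => t.2.1))).map
      (fun k => (k, s.filter (fun t => t.2.1 == k))) := by
  intro n
  induction n with
  | zero =>
    intro s hlen _
    have : s = [] := List.length_eq_zero_iff.mp (Nat.le_zero.mp hlen)
    subst this; simp [pvGroupby]
  | succ n ih =>
    intro s hlen hpw
    match s with
    | [] => simp [pvGroupby]
    | t :: rest =>
      rw [List.pairwise_cons] at hpw
      obtain ⟨hmono, hrest⟩ := hpw
      have hsplit : rest.takeWhile (fun u => u.2.1 == t.2.1) ++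
          rest.dropWhile (fun u => u.2.1 == t.2.1) = rest := List.takeWhile_append_dropWhile
      have hstar := pv_dropWhile_gt t rest hmono hrest
      have htwid : ∀ x ∈ (rest.takeWhile (fun u => u.2.1 == t.2.1)).map (fun t => t.2.1),
          x = t.2.1 := by
        intro x hx
        obtain ⟨u, hu, he⟩ := List.mem_map.mp hx
        have := List.mem_takeWhile_imp hu
        simp only [beq_iff_eq] at this
        omega
      have hnotin : t.2.1 ∉ (rest.dropWhile (fun u => u.2.1 == t.2.1)).map (fun t => t.2.1) := by
        intro hx
        obtain ⟨u, hu, he⟩ := List.mem_map.mp hx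
        have := hstar u hu; omega
      -- (a) the distinct horizons of s
      have ha : PySem.List.dedup ((t :: rest).map (fun t => t.2.1)) =
          t.2.1 :: PySem.List.dedup ((rest.dropWhile (fun u => u.2.1 == t.2.1)).map (fun t => t.2.1)) := by
        conv_lhs => rw [List.map_cons, ← hsplit, List.map_append]
        exact pv_dedup_block t.2.1 _ _ htwid hnotin
      -- (b) the first group
      have hb : (t :: rest).filter (fun u => u.2.1 == t.2.1) =
          t :: rest.takeWhile (fun u => u.2.1 == t.2.1) := by
        rw [List.filter_cons_of_pos (by simp)]
        conv_lhs => rw [← hsplit]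
        rw [List.filter_append,
          List.filter_eq_self.mpr (fun (u : Int × Int × Int × Int) (hu : u ∈ rest.takeWhile (fun u => u.2.1 == t.2.1)) => List.mem_takeWhile_imp hu),
          List.filter_eq_nil_iff.mpr (fun u hu => by
            have := hstar u hu; simp only [beq_iff_eq]; omega)]
        simp
      -- (c) later groups ignore the head block
      have hc : ∀ k ∈ PySem.List.dedup ((rest.dropWhile (fun u => u.2.1 == t.2.1)).map (fun t => t.2.1)),
          (t :: rest).filter (fun u => u.2.1 == k) =
            (rest.dropWhile (fun u => u.2.1 == t.2.1)).filter (fun u => u.2.1 == k) := by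
        intro k hk
        rw [PySem.List.dedup_eq_ofList, PySem.Set.mem_ofList] at hk
        obtain ⟨u, hu, he⟩ := List.mem_map.mp hk
        have hkgt : t.2.1 < k := by have := hstar u hu; omega
        rw [List.filter_cons_of_neg (by simp only [beq_iff_eq]; omega)]
        conv_lhs => rw [← hsplit]
        rw [List.filter_append,
          List.filter_eq_nil_iff.mpr (fun v hv => by
            have := htwid v.2.1 (List.mem_map.mpr ⟨v, hv, rfl⟩)
            simp only [beq_iff_eq]; omega)]
        simp
      have hlen' : (rest.dropWhile (fun u => u.2.1 == t.2.1)).length ≤ n := by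
        have h1 := List.length_dropWhile_le (fun u : Int × Int × Int × Int => u.2.1 == t.2.1) rest
        have h2 : rest.length + 1 ≤ n + 1 := by simpa using hlen
        omega
      have hih := ih (rest.dropWhile (fun u => u.2.1 == t.2.1)) hlen'
        (List.Pairwise.sublist (List.dropWhile_sublist (fun u : Int × Int × Int × Int => u.2.1 == t.2.1)) hrest)
      rw [pvGroupby, ha]
      simp only [List.map_cons]
      refine congrArg₂ List.cons ?_ ?_
      · rw [hb]
      · rw [hih]
        exact List.map_congr_left (fun k hk => by rw [hc k hk])

lemma pvB_eq_canon (demand : List (Int × Int × Int × Int)) :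
    demand_by_horizon_alt demand = pvCanon demand := by
  unfold demand_by_horizon_alt pvCanon
  set s := PySem.List.sorted demand pvKeyB with hs
  have hperm : s.Perm demand := PySem.List.sorted_perm demand pvKeyB false
  have hpw : s.Pairwise (fun a b => pvKeyB a ≤ pvKeyB b) := PySem.List.sorted_pairwise demand pvKeyB
  rw [pvGroupby_spec s.length s le_rfl hpw]
  -- the key lists agree
  have hkeys : PySem.List.dedup (s.map (fun t => t.2.1)) =
      PySem.List.sorted (PySem.Set.ofList (demand.map (fun t => t.2.1))) (fun h => h) := by
    apply (PySem.List.sorted_eq_of_perm_of_pairwise_lt _ _ _ _ _).symm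
    · -- permutation: two Nodup lists with the same members
      apply List.perm_of_nodup_nodup_toFinset_eq
      · rw [PySem.List.dedup_eq_ofList]; exact PySem.Set.nodup_ofList _
      · exact PySem.Set.nodup_ofList _
      · ext x
        simp only [List.mem_toFinset, PySem.List.dedup_eq_ofList, PySem.Set.mem_ofList,
          List.mem_map]
        constructor
        · rintro ⟨u, hu, he⟩; exact ⟨u, hperm.mem_iff.mp hu, he⟩
        · rintro ⟨u, hu, he⟩; exact ⟨u, hperm.mem_iff.mpr hu, he⟩
    · -- strictly increasing: nondecreasing (sorted) and Nodup (dedup)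
      have hle : (s.map (fun t => t.2.1)).Pairwise (· ≤ ·) := by
        rw [List.pairwise_map]; exact hpw.imp (fun h => pvKeyB_le_ids h)
      have hsub : (PySem.List.dedup (s.map (fun t => t.2.1))).Sublist (s.map (fun t => t.2.1)) := by
        rw [PySem.List.dedup_eq_ofList]
        simpa using pv_foldl_add_sublist (s.map (fun t => t.2.1)) []
      have hnd : (PySem.List.dedup (s.map (fun t => t.2.1))).Nodup := by
        rw [PySem.List.dedup_eq_ofList]; exact PySem.Set.nodup_ofList _
      have := (List.Pairwise.sublist hsub hle).and hnd
      exact this.imp (fun ⟨h1, h2⟩ => lt_of_le_of_ne h1 h2)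
  rw [hkeys]
  -- the groups agree
  apply List.map_congr_left
  intro k _
  refine congrArg _ ?_
  apply PySem.List.eq_of_perm_of_pairwise_le_of_injective pvKey4 pvKey4_injective
  · exact (hperm.filter _).trans (PySem.List.sorted_perm _ _ false).symm
  · have := hpw.filter (fun t => t.2.1 == k)
    refine this.imp_of_mem (fun {a b} ha hb hAB => ?_)
    have hak : a.2.1 = k := by simpa using (List.of_mem_filter ha)
    have hbk : b.2.1 = k := by simpa using (List.of_mem_filter hb)
    rcases (pvKeyB_le_iff a b).1 hAB with h' | h'
    · omega
    · exact h'.2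
  · exact PySem.List.sorted_pairwise _ _

lemma pvA_eq_canon (demand : List (Int × Int × Int × Int)) :
    demand_by_horizon demand = pvCanon demand := by
  show PySem.List.sorted
      ((PySem.Dict.mk
        (((demand.foldl (fun d tup => d.modify tup.2.1 [] (fun lst => lst ++ [tup]))
            PySem.Dict.empty).items).map
          (fun p => (p.1, PySem.List.sorted p.2 pvKey4)))).items) (fun p => p.1) = pvCanon demand
  unfold pvCanon
  set D : PySem.Dict Int (List (Int × Int × Int × Int)) :=
    demand.foldl (fun d tup => d.modify tup.2.1 [] (fun lst => lst ++ [tup])) PySem.Dict.empty with hD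
  have hkeys : D.keys = PySem.Set.ofList (demand.map (fun t => t.2.1)) := by
    rw [hD, PySem.Dict.keys_foldl_modify_key demand (fun t => t.2.1) []
      (fun _ t => fun lst => lst ++ [t]) PySem.Dict.empty]
    simp [PySem.Dict.keys_empty, PySem.Set.update_nil_left]
  have hnd : D.keys.Nodup := by
    rw [hkeys]; exact PySem.Set.nodup_ofList _
  have hgetD : ∀ h : Int, D.getD h [] = demand.filter (fun t => t.2.1 == h) := by
    intro h
    have hfold : D = (demand.map (fun t => (t.2.1, t))).foldl
        (fun d p => d.modify p.1 [] (fun lst => lst ++ [p.2])) PySem.Dict.empty := by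
      rw [hD, List.foldl_map]
    rw [hfold, PySem.Dict.getD_foldl_modify_append]
    rw [PySem.Dict.getD_empty, List.filter_map]
    simp [Function.comp_def]
  have hitems : D.items = (PySem.Set.ofList (demand.map (fun t => t.2.1))).map
      (fun h => (h, demand.filter (fun t => t.2.1 == h))) := by
    rw [PySem.Dict.items_eq_map_keys D hnd [], hkeys]
    exact List.map_congr_left (fun h _ => by rw [hgetD h])
  rw [hitems, List.map_map]
  apply PySem.List.sorted_eq_of_perm_of_pairwise_lt
  · exact ((PySem.List.sorted_perm _ _ false).map _)
  · rw [List.pairwise_map]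
    exact (PySem.List.sorted_ofList_pairwise_lt _).imp (fun h => by simpa using h)

-- ===== VERDICT (by name: the statement is the Claim_ definition above) =====
theorem demand_by_horizon_spec : Claim_equal_demand_by_horizon := by
  intro demand _
  unfold Spec_demand_by_horizon
  rw [pvA_eq_canon, pvB_eq_canon]
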